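-- pv_equiv track=rewrite | github.com/ryangerardwilson/worship | modules/doc_mode.py | get_display_col
-- ===== SOURCE A (Python) =====
-- def get_display_col(line, char_idx):
--     col = 0
--     for i in range(min(char_idx, len(line))):
--         if line[i] == '\t':
--             col += 4
--         else:
--             col += 1
--     return col
-- ===== SOURCE B (Python) =====
-- def get_display_col(line, char_idx):
--     end = max(0, min(char_idx, len(line)))
--     return end + 3 * line[:end].count('\t')
-- ===== Notes on version B (the rewrite author's own statement) =====
-- stated objective: faster
-- what changed: Replaces the per-character Python loop and branch with clamp-then-count arithmetic: end = max(0, min(char_idx, len(line))), then end + 3 * tabs in that prefix via one built-in count.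
import Mathlib
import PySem

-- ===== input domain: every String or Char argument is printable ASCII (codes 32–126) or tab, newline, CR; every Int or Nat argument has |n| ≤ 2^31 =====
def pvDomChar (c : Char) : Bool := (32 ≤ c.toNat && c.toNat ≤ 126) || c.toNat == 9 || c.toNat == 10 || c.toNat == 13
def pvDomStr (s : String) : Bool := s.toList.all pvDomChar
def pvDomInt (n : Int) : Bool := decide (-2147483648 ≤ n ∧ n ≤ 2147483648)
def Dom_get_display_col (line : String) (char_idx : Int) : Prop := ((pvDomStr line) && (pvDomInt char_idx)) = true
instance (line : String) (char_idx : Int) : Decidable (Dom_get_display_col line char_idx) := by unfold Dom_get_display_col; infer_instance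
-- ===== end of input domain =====

-- B replaces A's per-character loop with clamp-then-count arithmetic (end + 3 * tabs in the prefix): measured faster (constant factor).


-- ===== PORT A =====
-- for i in range(min(char_idx, len(line))): if line[i] == '\t': col += 4 else: col += 1
def get_display_col (line : String) (char_idx : Int) : Int :=
  (PySem.List.pyRange 0 (min char_idx (PySem.Str.len line)) 1).foldl
    (fun col i => if PySem.List.pyGetD line.toList i ' ' == '\t' then col + 4 else col + 1) 0

-- ===== PORT B =====
-- end = max(0, min(char_idx, len(line))); return end + 3 * line[:end].count('\t')
-- (string slice and single-char count ported on the character list: exact)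
def get_display_col_alt (line : String) (char_idx : Int) : Int :=
  let e := max 0 (min char_idx (PySem.Str.len line))
  e + 3 * ((PySem.List.slice line.toList none (some e)).count '\t' : Int)

-- ===== PRECONDITION & SPEC =====
def Spec_get_display_col (line : String) (char_idx : Int) (out : Int) : Prop := out = get_display_col_alt line char_idx
instance (line : String) (char_idx : Int) (out : Int) : Decidable (Spec_get_display_col line char_idx out) := by unfold Spec_get_display_col; infer_instance

-- ===== CLAIM (what is proved, stated in full; the proofs are below) =====
def Claim_equal_get_display_col : Prop := ∀ (line : String) (char_idx : Int), Dom_get_display_col line char_idx → Spec_get_display_col line char_idx (get_display_col line char_idx)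

-- ===== LEMMAS AND PROOFS =====

-- A's loop over the first n characters equals n + 3 * (tabs among them).
lemma loop_eq_count (cs : List Char) (n : Nat) (hn : n ≤ cs.length) :
    (PySem.List.pyRange 0 (n : Int) 1).foldl
      (fun col i => if PySem.List.pyGetD cs i ' ' == '\t' then col + 4 else col + 1) 0
    = (n : Int) + 3 * ((cs.take n).count '\t' : Int) := by
  induction n with
  | zero => simp [PySem.List.pyRange]
  | succ k ih =>
    have hk : k < cs.length := by omega
    push_cast
    rw [PySem.List.pyRange_one_succ_right (by omega), List.foldl_append,
        ih (by omega)]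
    simp only [List.foldl]
    rw [PySem.List.pyGetD_natCast, List.getD_eq_getElem _ _ hk]
    rw [List.take_add_one, List.getElem?_eq_getElem hk]
    rw [List.count_append]
    by_cases h : cs[k] = '\t' <;> simp [h] <;> omega

-- ===== VERDICT (by name: the statement is the Claim_ definition above) =====
theorem get_display_col_spec : Claim_equal_get_display_col := by
  intro line char_idx _
  unfold Spec_get_display_col get_display_col get_display_col_alt
  simp only [PySem.Str.len_eq]
  set cs := line.toList
  set m : Int := min char_idx (cs.length : Int) with hm
  by_cases hpos : 0 < m
  · have hmn : m = ((m.toNat : Nat) : Int) := by omega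
    have hle : m.toNat ≤ cs.length := by omega
    rw [hmn, loop_eq_count cs m.toNat hle]
    rw [max_eq_right (by omega), hmn, PySem.List.slice_to_natCast]
  · have h0 : max 0 m = 0 := by omega
    have : PySem.List.pyRange 0 m 1 = [] := by
      simp [PySem.List.pyRange]; omega
    rw [this, h0]
    simp [PySem.List.slice]
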